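-- pv_equiv track=rewrite | github.com/moussebrewer/quantum_truco | src/Quantum Truco.py | circular_order
-- ===== SOURCE A (Python) =====
-- from typing import Dict, List, Optional, Tuple, Iterable, Set
--
-- def circular_order(active_seats: List[int], start_seat: int, table_size: int) -> List[int]:
--     active = set(active_seats)
--     out: List[int] = []
--     for i in range(table_size):
--         s = (start_seat + i) % table_size
--         if s in active:
--             out.append(s)
--     return out
-- ===== SOURCE B (Python) =====
-- def circular_order(active_seats, start_seat, table_size):
--     if table_size <= 0:
--         return []
--     cand = {s for s in active_seats if 0 <= s < table_size}
--     return sorted(cand, key=lambda s: (s - start_seat) % table_size)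
-- ===== Notes on version B (the rewrite author's own statement) =====
-- stated objective: faster
-- what changed: Instead of scanning all table_size positions and testing membership, B keeps only the distinct active seats inside [0, table_size) and sorts them by their circular offset (s - start_seat) % table_size.
import Mathlib
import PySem

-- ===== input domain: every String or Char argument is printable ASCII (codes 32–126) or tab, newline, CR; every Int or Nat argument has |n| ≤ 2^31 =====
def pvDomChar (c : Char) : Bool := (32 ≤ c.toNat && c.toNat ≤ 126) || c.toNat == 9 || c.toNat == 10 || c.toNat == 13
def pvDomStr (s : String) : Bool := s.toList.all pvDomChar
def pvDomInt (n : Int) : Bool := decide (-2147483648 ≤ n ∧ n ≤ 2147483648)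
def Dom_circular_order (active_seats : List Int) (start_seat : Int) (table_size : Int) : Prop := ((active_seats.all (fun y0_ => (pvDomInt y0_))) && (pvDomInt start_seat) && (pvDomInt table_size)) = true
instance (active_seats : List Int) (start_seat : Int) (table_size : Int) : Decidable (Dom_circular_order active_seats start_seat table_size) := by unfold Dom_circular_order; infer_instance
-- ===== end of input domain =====

-- B replaces A's O(table_size) scan over every position by filtering the distinct
-- active seats into [0, table_size) and sorting them by circular offset (faster for sparse tables).

-- ===== PORT A =====
def circular_order (active_seats : List Int) (start_seat : Int) (table_size : Int) : List Int :=
  let active : PySem.Set Int := PySem.Set.ofList active_seats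
  (PySem.List.pyRange 0 table_size 1).foldl
    (fun out i =>
      let s := PySem.Int.mod (start_seat + i) table_size
      if PySem.Set.contains active s then out ++ [s] else out) []

-- ===== PORT B =====
def circular_order_alt (active_seats : List Int) (start_seat : Int) (table_size : Int) : List Int :=
  if table_size ≤ 0 then []
  else
    let cand : PySem.Set Int :=
      PySem.Set.ofList (active_seats.filter (fun s => decide (0 ≤ s ∧ s < table_size)))
    PySem.List.sorted cand (fun s => PySem.Int.mod (s - start_seat) table_size) false

-- ===== PRECONDITION & SPEC =====
def Spec_circular_order (active_seats : List Int) (start_seat : Int) (table_size : Int) (out : List Int) : Prop := out = circular_order_alt active_seats start_seat table_size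
instance (active_seats : List Int) (start_seat : Int) (table_size : Int) (out : List Int) : Decidable (Spec_circular_order active_seats start_seat table_size out) := by unfold Spec_circular_order; infer_instance

-- ===== CLAIM (what is proved, stated in full; the proofs are below) =====
def Claim_equal_circular_order : Prop := ∀ (active_seats : List Int) (start_seat : Int) (table_size : Int), Dom_circular_order active_seats start_seat table_size → Spec_circular_order active_seats start_seat table_size (circular_order active_seats start_seat table_size)

-- ===== LEMMAS AND PROOFS =====

-- the circular offset of seat (ss+i) % ts is i itself, for 0 ≤ i < ts
theorem pv_key_f (ss ts i : Int) (hts : 0 < ts) (h0 : 0 ≤ i) (h1 : i < ts) :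
    PySem.Int.mod (PySem.Int.mod (ss + i) ts - ss) ts = i := by
  rw [PySem.Int.mod_eq_emod_of_pos hts, PySem.Int.mod_eq_emod_of_pos hts]
  have : ((ss + i) % ts - ss) % ts = ((ss + i) - ss) % ts := by
    rw [Int.sub_emod, Int.emod_emod_of_dvd _ dvd_rfl, ← Int.sub_emod]
  rw [this, add_sub_cancel_left, Int.emod_eq_of_lt h0 h1]

-- the seat at offset (x-ss) % ts is x itself, for 0 ≤ x < ts
theorem pv_f_key (ss ts x : Int) (hts : 0 < ts) (h0 : 0 ≤ x) (h1 : x < ts) :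
    PySem.Int.mod (ss + PySem.Int.mod (x - ss) ts) ts = x := by
  rw [PySem.Int.mod_eq_emod_of_pos hts, PySem.Int.mod_eq_emod_of_pos hts]
  have : (ss + (x - ss) % ts) % ts = (ss + (x - ss)) % ts := by
    rw [Int.add_emod, Int.emod_emod_of_dvd _ dvd_rfl, ← Int.add_emod]
  rw [this, add_sub_cancel, Int.emod_eq_of_lt h0 h1]

theorem pv_main (active_seats : List Int) (start_seat : Int) (table_size : Int) :
    circular_order active_seats start_seat table_size
      = circular_order_alt active_seats start_seat table_size := by
  by_cases hts : table_size ≤ 0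
  · simp [circular_order, circular_order_alt, hts, PySem.List.pyRange_one_eq_nil hts]
  · have hpos : 0 < table_size := by omega
    set ss := start_seat
    set ts := table_size
    set active : PySem.Set Int := PySem.Set.ofList active_seats with hact
    set f : Int → Int := fun i => PySem.Int.mod (ss + i) ts with hf
    set key : Int → Int := fun s => PySem.Int.mod (s - ss) ts with hkey
    set p : Int → Bool := fun i => PySem.Set.contains active (f i) with hp
    -- A's loop is a filter-map over the range
    have hA : circular_order active_seats ss ts
        = ((PySem.List.pyRange 0 ts 1).filter p).map f := by
      show (PySem.List.pyRange 0 ts 1).foldl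
          (fun out i => if p i then out ++ [f i] else out) [] = _
      rw [PySem.List.foldl_append_if]
      simp
    set ys : List Int := ((PySem.List.pyRange 0 ts 1).filter p).map f with hys
    set cand : List Int :=
      PySem.Set.ofList (active_seats.filter (fun s => decide (0 ≤ s ∧ s < ts))) with hcand
    -- ys has no duplicates
    have hmemrange : ∀ i ∈ (PySem.List.pyRange 0 ts 1).filter p, 0 ≤ i ∧ i < ts := by
      intro i hi
      have := (List.mem_filter.mp hi).1
      exact (PySem.List.mem_pyRange_one.mp this)
    have hnys : ys.Nodup := by
      refine List.Nodup.map_on ?_ (List.Nodup.filter _ (PySem.List.nodup_pyRange_one 0 ts))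
      intro i hi j hj hij
      obtain ⟨hi0, hi1⟩ := hmemrange i hi
      obtain ⟨hj0, hj1⟩ := hmemrange j hj
      have h2 : key (f i) = key (f j) := by rw [hij]
      simp only [hkey, hf] at h2
      rwa [pv_key_f ss ts i hpos hi0 hi1, pv_key_f ss ts j hpos hj0 hj1] at h2
    -- same members
    have hmem : ∀ x, x ∈ ys ↔ x ∈ cand := by
      intro x
      rw [hys, hcand, PySem.Set.mem_ofList, List.mem_filter, List.mem_map]
      constructor
      · rintro ⟨i, hi, rfl⟩
        obtain ⟨hi0, hi1⟩ := hmemrange i hi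
        have hpi : p i = true := (List.mem_filter.mp hi).2
        have hmemact : f i ∈ active := (PySem.Set.contains_iff active (f i)).mp hpi
        have : f i ∈ active_seats := (PySem.Set.mem_ofList active_seats (f i)).mp hmemact
        refine ⟨this, ?_⟩
        simp only [decide_eq_true_eq]
        exact ⟨PySem.Int.mod_nonneg _ hpos, PySem.Int.mod_lt _ hpos⟩
      · rintro ⟨hxas, hxb⟩
        simp only [decide_eq_true_eq] at hxb
        obtain ⟨hx0, hx1⟩ := hxb
        refine ⟨PySem.Int.mod (x - ss) ts, ?_, ?_⟩
        · rw [List.mem_filter]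
          constructor
          · exact PySem.List.mem_pyRange_one.mpr
              ⟨PySem.Int.mod_nonneg _ hpos, PySem.Int.mod_lt _ hpos⟩
          · have hfx : f (PySem.Int.mod (x - ss) ts) = x := by
              simp only [hf]; exact pv_f_key ss ts x hpos hx0 hx1
            simp only [hp, hfx]
            exact (PySem.Set.contains_iff active x).mpr
              ((PySem.Set.mem_ofList active_seats x).mpr hxas)
        · simp only [hf]; exact pv_f_key ss ts x hpos hx0 hx1
    have hperm : ys.Perm cand :=
      (List.perm_ext_iff_of_nodup hnys (PySem.Set.nodup_ofList _)).mpr hmem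
    -- ys is strictly increasing under key
    have hpw : ys.Pairwise (fun a b => key a < key b) := by
      rw [hys, List.pairwise_map]
      refine List.Pairwise.imp_of_mem ?_
        (List.Pairwise.filter _ (PySem.List.pairwise_lt_pyRange_one 0 ts))
      intro a b ha hb hab
      obtain ⟨ha0, ha1⟩ := hmemrange a ha
      obtain ⟨hb0, hb1⟩ := hmemrange b hb
      simp only [hkey, hf]
      rw [pv_key_f ss ts a hpos ha0 ha1, pv_key_f ss ts b hpos hb0 hb1]
      exact hab
    have hB : circular_order_alt active_seats ss ts
        = PySem.List.sorted cand key false := by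
      simp [circular_order_alt, hts, hcand, hkey]
    rw [hA, hB, PySem.List.sorted_eq_of_perm_of_pairwise_lt cand ys key hperm hpw]

-- ===== VERDICT (by name: the statement is the Claim_ definition above) =====
theorem circular_order_spec : Claim_equal_circular_order := by
  intro as ss ts _
  exact pv_main as ss ts
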